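-- pv_equiv track=rewrite | github.com/scottstts/JARVIS.py | src/tools/bash/policy.py | _has_any_option
-- ===== SOURCE A (Python) =====
-- def _has_any_option(args: list[str], option_names: set[str]) -> bool:
--     for token in args:
--         if token == "--":
--             break
--         if token in option_names:
--             return True
--         for option_name in option_names:
--             if option_name.startswith("--") and token.startswith(f"{option_name}="):
--                 return True
--             if option_name.startswith("-") and not option_name.startswith("--") and len(option_name) == 2:
--                 if token.startswith(option_name) and len(token) > len(option_name):
--                     return True
--     return False
-- ===== SOURCE B (Python) =====
-- def _has_any_option(args: list[str], option_names: set[str]) -> bool: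
--     longs = {n for n in option_names if n.startswith("--")}
--     shorts = {n for n in option_names
--               if len(n) == 2 and n.startswith("-") and not n.startswith("--")}
--     for token in args:
--         if token == "--":
--             break
--         if token in option_names:
--             return True
--         eq = token.find("=")
--         if eq != -1 and token[:eq] in longs:
--             return True
--         if len(token) > 2 and token[:2] in shorts:
--             return True
--     return False
-- ===== Notes on version B (the rewrite author's own statement) =====
-- stated objective: alternative
-- what changed: B partitions option_names once into long '--name' and short '-x' lookup sets before the loop and tests each token by splitting it at its first '=' (for long options) and taking token[:2] (for short options) with set lookups, removing A's inner scan over all option names for every token; Pre_ excludes option lists containing a long option name with '=' in it, where A's prefix test and B's split-at-first-'=' defensibly disagree.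
-- outside the precondition, e.g. on _has_any_option(['--a=b=c'], {'--a=b'}): A returns True, B returns False
import Mathlib
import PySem

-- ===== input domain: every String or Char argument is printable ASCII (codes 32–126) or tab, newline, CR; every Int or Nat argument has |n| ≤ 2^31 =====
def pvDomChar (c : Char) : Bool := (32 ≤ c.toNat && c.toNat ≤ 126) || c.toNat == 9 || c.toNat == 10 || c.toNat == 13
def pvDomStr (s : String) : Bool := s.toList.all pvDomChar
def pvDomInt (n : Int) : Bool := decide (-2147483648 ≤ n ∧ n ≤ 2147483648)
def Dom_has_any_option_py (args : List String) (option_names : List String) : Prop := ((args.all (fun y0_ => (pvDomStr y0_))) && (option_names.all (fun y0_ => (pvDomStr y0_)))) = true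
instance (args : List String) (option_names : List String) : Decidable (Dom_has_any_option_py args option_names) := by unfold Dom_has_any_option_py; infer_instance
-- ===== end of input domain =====

-- B partitions option_names once into long/short lookup sets and tests each token by its first '='
-- and token[:2], removing A's per-token inner scan over all option names (objective: alternative);
-- Pre_ excludes option lists containing a long option name with '=' in it (see comment at Pre_).


-- ===== PORT A =====
-- the inner `for option_name in option_names: if …: return True` loop
def pvInnerA (token : String) (option_names : List String) : Bool :=
  option_names.any (fun option_name =>
    (PySem.Str.startswith option_name "--" && PySem.Str.startswith token (option_name ++ "=")) ||
    (PySem.Str.startswith option_name "-" && !PySem.Str.startswith option_name "--" &&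
      (PySem.Str.len option_name == 2) &&
      (PySem.Str.startswith token option_name &&
        decide (PySem.Str.len option_name < PySem.Str.len token))))

-- the outer `for token in args` loop, with the `break` on "--"
def pvLoopA (option_names : List String) : List String → Bool
  | [] => false
  | token :: rest =>
    if token == "--" then false
    else if option_names.contains token then true
    else if pvInnerA token option_names then true
    else pvLoopA option_names rest

def has_any_option_py (args : List String) (option_names : List String) : Bool :=
  pvLoopA option_names args

-- ===== PORT B =====
-- `{n for n in option_names if n.startswith("--")}` (option_names is a set, so filtering keeps distinctness)
def pvLongs (option_names : List String) : List String :=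
  option_names.filter (fun n => PySem.Str.startswith n "--")

-- `{n for n in option_names if len(n) == 2 and n.startswith("-") and not n.startswith("--")}`
def pvShorts (option_names : List String) : List String :=
  option_names.filter (fun n =>
    (PySem.Str.len n == 2) && PySem.Str.startswith n "-" && !PySem.Str.startswith n "--")

-- B's `for token in args` loop over the prebuilt lookup sets
def pvLoopB (option_names longs shorts : List String) : List String → Bool
  | [] => false
  | token :: rest =>
    if token == "--" then false
    else if option_names.contains token then true
    else
      let eq := PySem.Str.find token "="
      if (eq != -1) && longs.contains (PySem.Str.slice token none (some eq)) then true
      else if decide (2 < PySem.Str.len token) &&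
          shorts.contains (PySem.Str.slice token none (some 2)) then true
      else pvLoopB option_names longs shorts rest

def has_any_option_py_alt (args : List String) (option_names : List String) : Bool :=
  pvLoopB option_names (pvLongs option_names) (pvShorts option_names) args

-- ===== PRECONDITION & SPEC =====
-- Pre_ excludes option lists in which some long option name ('--…') itself contains '=': option
-- names never contain '=', and on such degenerate names A's prefix test and B's split-at-first-'='
-- are both defensible readings that can disagree.
def Pre_has_any_option_py (args : List String) (option_names : List String) : Prop :=
  (option_names.all (fun n => !PySem.Str.startswith n "--" || !PySem.Str.isIn "=" n)) = true
instance (args : List String) (option_names : List String) : Decidable (Pre_has_any_option_py args option_names) := by unfold Pre_has_any_option_py; infer_instance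

def pvWitness_has_any_option_py : List String × List String := (["-x1"], ["--flag", "-x"])

def Spec_has_any_option_py (args : List String) (option_names : List String) (out : Bool) : Prop := out = has_any_option_py_alt args option_names
instance (args : List String) (option_names : List String) (out : Bool) : Decidable (Spec_has_any_option_py args option_names out) := by unfold Spec_has_any_option_py; infer_instance

-- ===== CLAIM (what is proved, stated in full; the proofs are below) =====
def Claim_equal_has_any_option_py : Prop := ∀ (args : List String) (option_names : List String), Dom_has_any_option_py args option_names → Pre_has_any_option_py args option_names → Spec_has_any_option_py args option_names (has_any_option_py args option_names)

-- ===== LEMMAS AND PROOFS =====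

theorem pv_sliceL (token : String) (b : Int) (hb : 0 ≤ b) :
    (PySem.Str.slice token none (some b)).toList = token.toList.take b.toNat := by
  simp [PySem.Str.slice, PySem.List.slice_to _ hb]

theorem pv_prefix_drop_iff (l : List Char) (i : Nat) (h : i < l.length) :
    ['='] <+: l.drop i ↔ l[i] = '=' := by
  rw [← List.getElem_cons_drop h]
  constructor
  · rintro ⟨t, ht⟩
    exact (List.cons_eq_cons.mp ht).1.symm
  · intro he
    exact ⟨l.drop (i+1), by simp [he]⟩

theorem pv_short_iff (token : String) (option_names : List String) :
    ((decide (2 < PySem.Str.len token) &&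
      (pvShorts option_names).contains (PySem.Str.slice token none (some 2))) = true)
    ↔ ∃ n ∈ option_names, (PySem.Str.startswith n "-" && !PySem.Str.startswith n "--" &&
        (PySem.Str.len n == 2) &&
        (PySem.Str.startswith token n &&
          decide (PySem.Str.len n < PySem.Str.len token))) = true := by
  have hsl := pv_sliceL token 2 (by norm_num)
  constructor
  · intro h
    rw [Bool.and_eq_true] at h
    obtain ⟨hlenb, hconb⟩ := h
    have hlen : (2:Int) < (token.toList.length : Int) := by
      have := of_decide_eq_true hlenb; rwa [PySem.Str.len_eq] at this
    simp only [pvShorts, List.contains_eq_mem, decide_eq_true_eq, List.mem_filter] at hconb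
    obtain ⟨hmem, hpred⟩ := hconb
    simp only [Bool.and_eq_true, Bool.not_eq_true', beq_iff_eq, PySem.Str.len_eq] at hpred
    obtain ⟨⟨hl2, hdash⟩, hnd⟩ := hpred
    refine ⟨PySem.Str.slice token none (some 2), hmem, ?_⟩
    simp only [Bool.and_eq_true, Bool.not_eq_true', beq_iff_eq, decide_eq_true_eq,
      PySem.Str.len_eq]
    refine ⟨⟨⟨hdash, hnd⟩, hl2⟩, ?_, ?_⟩
    · rw [PySem.Str.startswith_eq, PySem.Chars.startswith_iff, hsl]
      exact List.take_prefix _ _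
    · rw [hsl]
      simp only [List.length_take]
      push_cast
      omega
  · rintro ⟨n, hmem, hn⟩
    simp only [Bool.and_eq_true, Bool.not_eq_true', decide_eq_true_eq, PySem.Str.len_eq,
      beq_iff_eq] at hn
    obtain ⟨⟨⟨hdash, hnd⟩, hl2⟩, hpre, hlt⟩ := hn
    have hl2' : n.toList.length = 2 := by exact_mod_cast hl2
    have htake : token.toList.take 2 = n.toList := by
      have := (List.prefix_iff_eq_take).mp
        ((PySem.Chars.startswith_iff _ _).mp (by rw [PySem.Str.startswith_eq] at hpre; exact hpre))
      rw [hl2'] at this; exact this.symm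
    have hs : PySem.Str.slice token none (some 2) = n := by
      rw [String.ext_iff, hsl]; exact htake
    rw [Bool.and_eq_true]
    constructor
    · rw [decide_eq_true_eq, PySem.Str.len_eq]
      have : n.toList.length < token.toList.length := by exact_mod_cast hlt
      omega
    · simp only [pvShorts, List.contains_eq_mem, decide_eq_true_eq, List.mem_filter]
      rw [hs]
      refine ⟨hmem, ?_⟩
      simp only [Bool.and_eq_true, Bool.not_eq_true', beq_iff_eq, PySem.Str.len_eq]
      exact ⟨⟨hl2, hdash⟩, hnd⟩

theorem pv_long_iff (token : String) (option_names : List String)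
    (hP : ∀ n ∈ option_names, PySem.Str.startswith n "--" = true →
        PySem.Str.isIn "=" n = false) :
    (((PySem.Str.find token "=" != -1) &&
      (pvLongs option_names).contains
        (PySem.Str.slice token none (some (PySem.Str.find token "=")))) = true)
    ↔ ∃ n ∈ option_names, PySem.Str.startswith n "--" = true ∧
        PySem.Str.startswith token (n ++ "=") = true := by
  have htl : ("=" : String).toList = ['='] := rfl
  have hbridge : PySem.Str.find token "=" = PySem.Chars.find token.toList ['='] := by
    rw [PySem.Str.find_eq, htl]
  constructor
  · intro h
    rw [Bool.and_eq_true] at h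
    obtain ⟨hne, hcon⟩ := h
    have hne' : PySem.Chars.find token.toList ['='] ≠ -1 := by
      rw [← hbridge]; simpa using hne
    have hf0 : 0 ≤ PySem.Chars.find token.toList ['='] := by
      have := PySem.Chars.neg_one_le_find token.toList ['=']
      omega
    have hspec := PySem.Chars.find_spec (s := token.toList) (sub := ['=']) hf0
    have hflt : (PySem.Chars.find token.toList ['=']).toNat < token.toList.length := by
      by_contra hge
      have : token.toList.drop (PySem.Chars.find token.toList ['=']).toNat = [] :=
        List.drop_eq_nil_of_le (by omega)
      rw [this] at hspec
      exact absurd hspec.1.length_le (by simp)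
    have heqc : token.toList[(PySem.Chars.find token.toList ['=']).toNat] = '=' :=
      (pv_prefix_drop_iff _ _ hflt).mp hspec.1
    simp only [pvLongs, List.contains_eq_mem, decide_eq_true_eq, List.mem_filter] at hcon
    obtain ⟨hmem, hsw⟩ := hcon
    have htksucc := List.take_succ_eq_append_getElem hflt
    rw [heqc] at htksucc
    refine ⟨_, hmem, hsw, ?_⟩
    rw [PySem.Str.startswith_eq, PySem.Chars.startswith_iff, String.toList_append,
      pv_sliceL token _ (by rw [hbridge]; exact hf0), hbridge, htl, ← htksucc]
    exact List.take_prefix _ _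
  · rintro ⟨n, hmem, hsw, hpre⟩
    have hnoeq : '=' ∉ n.toList := by
      have hfalse := hP n hmem hsw
      intro hm
      have ht : PySem.Str.isIn "=" n = true := by
        rw [PySem.Str.isIn_iff_infix, htl]
        exact (List.singleton_infix_iff '=' n.toList).mpr hm
      rw [hfalse] at ht
      exact Bool.false_ne_true ht
    rw [PySem.Str.startswith_eq, PySem.Chars.startswith_iff, String.toList_append, htl] at hpre
    have hpre' : n.toList ++ ['='] <+: token.toList := hpre
    have hnp : n.toList <+: token.toList := (List.prefix_append _ _).trans hpre'
    have hlen : n.toList.length + 1 ≤ token.toList.length := by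
      have := hpre'.length_le; simpa using this
    set k := n.toList.length with hkdef
    have hkk : k < token.toList.length := by omega
    have htk : token.toList.take (k+1) = n.toList ++ ['='] := by
      have := (List.prefix_iff_eq_take).mp hpre'
      simp only [List.length_append, List.length_singleton] at this
      exact this.symm
    have hgetk : token.toList[k] = '=' := by
      have h1 : (token.toList.take (k+1))[k]'(by rw [List.length_take]; omega) = token.toList[k] :=
        List.getElem_take
      have h2 : (n.toList ++ ['='])[k]'(by simp only [List.length_append, List.length_singleton]; omega) = '=' := by
        rw [List.getElem_append_right (by omega)]
        simp [hkdef]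
      calc token.toList[k] = (token.toList.take (k+1))[k]'(by rw [List.length_take]; omega) := h1.symm
        _ = (n.toList ++ ['='])[k]'(by simp only [List.length_append, List.length_singleton]; omega) := List.getElem_of_eq htk _
        _ = '=' := h2
    have hinf : ['='] <:+: token.toList :=
      (List.singleton_infix_iff '=' token.toList).mpr (hgetk ▸ List.getElem_mem hkk)
    have hf0 : 0 ≤ PySem.Chars.find token.toList ['='] :=
      (PySem.Chars.find_nonneg_iff _ _).mpr hinf
    have hspec := PySem.Chars.find_spec (s := token.toList) (sub := ['=']) hf0
    set fn := (PySem.Chars.find token.toList ['=']).toNat with hfndef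
    have hfle : fn ≤ k := by
      by_contra hgt
      exact hspec.2 k (by omega) ((pv_prefix_drop_iff _ _ hkk).mpr hgetk)
    have hfeq : fn = k := by
      rcases Nat.lt_or_ge fn k with hlt | hge
      · exfalso
        have hflt : fn < token.toList.length := by omega
        have hc : token.toList[fn] = '=' := (pv_prefix_drop_iff _ _ hflt).mp hspec.1
        have hg : n.toList[fn]'(by omega) = token.toList[fn] :=
          List.IsPrefix.getElem hnp _
        have hg2 : n.toList[fn]'(by omega) = '=' := hg.trans hc
        exact hnoeq (hg2 ▸ List.getElem_mem (by omega))
      · omega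
    have hfind : PySem.Str.find token "=" = (k : Int) := by
      rw [hbridge]
      omega
    rw [Bool.and_eq_true]
    refine ⟨by rw [hfind]; simp, ?_⟩
    have hslice : PySem.Str.slice token none (some (PySem.Str.find token "=")) = n := by
      rw [hfind, String.ext_iff, pv_sliceL token (k:Int) (by positivity), Int.toNat_natCast]
      exact ((List.prefix_iff_eq_take).mp hnp).symm
    rw [hslice]
    simp only [pvLongs, List.contains_eq_mem, decide_eq_true_eq, List.mem_filter]
    exact ⟨hmem, hsw⟩

theorem pv_inner_eq (token : String) (option_names : List String)
    (hP : ∀ n ∈ option_names, PySem.Str.startswith n "--" = true →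
        PySem.Str.isIn "=" n = false) :
    pvInnerA token option_names =
      (((PySem.Str.find token "=" != -1) &&
          (pvLongs option_names).contains
            (PySem.Str.slice token none (some (PySem.Str.find token "=")))) ||
        (decide (2 < PySem.Str.len token) &&
          (pvShorts option_names).contains (PySem.Str.slice token none (some 2)))) := by
  apply Bool.coe_iff_coe.mp
  rw [Bool.or_eq_true, pv_long_iff token option_names hP, pv_short_iff]
  unfold pvInnerA
  rw [List.any_eq_true]
  constructor
  · rintro ⟨n, hmem, hc⟩
    rw [Bool.or_eq_true] at hc
    rcases hc with h | h
    · rw [Bool.and_eq_true] at h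
      exact Or.inl ⟨n, hmem, h.1, h.2⟩
    · exact Or.inr ⟨n, hmem, h⟩
  · rintro (⟨n, hmem, h1, h2⟩ | ⟨n, hmem, h⟩)
    · exact ⟨n, hmem, by rw [Bool.or_eq_true, Bool.and_eq_true]; exact Or.inl ⟨h1, h2⟩⟩
    · exact ⟨n, hmem, by rw [Bool.or_eq_true]; exact Or.inr h⟩

theorem pv_loop_eq (option_names : List String)
    (hP : ∀ n ∈ option_names, PySem.Str.startswith n "--" = true →
        PySem.Str.isIn "=" n = false) :
    ∀ args : List String,
      pvLoopB option_names (pvLongs option_names) (pvShorts option_names) args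
        = pvLoopA option_names args := by
  intro args
  induction args with
  | nil => rfl
  | cons token rest ih =>
    show _ = (if token == "--" then false
        else if option_names.contains token then true
        else if pvInnerA token option_names then true
        else pvLoopA option_names rest)
    rw [pvLoopB.eq_def]
    dsimp only
    by_cases hbrk : (token == "--") = true
    · rw [if_pos hbrk, if_pos hbrk]
    · rw [if_neg hbrk, if_neg hbrk]
      by_cases hc : option_names.contains token = true
      · rw [if_pos hc, if_pos hc]
      · rw [if_neg hc, if_neg hc, pv_inner_eq token option_names hP]
        by_cases hl : ((PySem.Str.find token "=" != -1) &&
            (pvLongs option_names).contains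
              (PySem.Str.slice token none (some (PySem.Str.find token "=")))) = true
        · rw [if_pos hl, hl, Bool.true_or, if_pos rfl]
        · rw [if_neg hl]
          rw [Bool.not_eq_true] at hl
          rw [hl, Bool.false_or]
          by_cases hs : (decide (2 < PySem.Str.len token) &&
              (pvShorts option_names).contains (PySem.Str.slice token none (some 2))) = true
          · rw [if_pos hs, if_pos hs]
          · rw [if_neg hs, if_neg hs]
            exact ih

-- ===== VERDICT (by name: the statement is the Claim_ definition above) =====
theorem has_any_option_py_spec : Claim_equal_has_any_option_py := by
  intro args option_names _ hpre
  unfold Spec_has_any_option_py has_any_option_py has_any_option_py_alt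
  have hP : ∀ n ∈ option_names, PySem.Str.startswith n "--" = true →
      PySem.Str.isIn "=" n = false := by
    unfold Pre_has_any_option_py at hpre
    rw [List.all_eq_true] at hpre
    intro n hn hsw
    have := hpre n hn
    rw [Bool.or_eq_true, Bool.not_eq_true', Bool.not_eq_true'] at this
    rcases this with h | h
    · rw [h] at hsw; cases hsw
    · exact h
  exact (pv_loop_eq option_names hP args).symm
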